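-- pv_equiv track=rewrite | github.com/ericsonnascimento/desafios_dio_ciberseguranca | desafio_busca_de_vulnerabilidade/busca_por_vulnerabilidades_2.py | detectar_invasao
-- ===== SOURCE A (Python) =====
-- def detectar_invasao(registros):
--     # Variáveis para rastrear o ID do usuário atual e suas falhas consecutivas
--     usuario_atual = None
--     tentativas_consecutivas = 0
--     invasor_detectado = None
--
--     # Percorre cada registro de log
--     for registro in registros:
--         # Separa o ID do usuário e o status do registro (sucesso ou falha)
--         usuario, status = registro.split(":")
--
--         # Verifica se o usuário atual é o mesmo da iteração anterior
--         if usuario == usuario_atual: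
--             # Se o status é "falha", incremente o contador de tentativas falhas
--             if status == "falha":
--                 tentativas_consecutivas += 1
--                 # Se o usuário teve mais de 3 falhas consecutivas, marque como invasor
--                 if tentativas_consecutivas > 3:
--                     invasor_detectado = usuario
--             else:  # Se a tentativa foi bem-sucedida, resete o contador de falhas
--                 tentativas_consecutivas = 0
--         else:
--             # Se mudar de usuário, verifique se o usuário anterior teve mais de 3 falhas consecutivas
--             if tentativas_consecutivas > 3:
--                 invasor_detectado = usuario_atual
--
--             # Atualize para o novo usuário e reinicie a contagem de tentativas falhas
--             usuario_atual = usuario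
--             tentativas_consecutivas = 1 if status == "falha" else 0
--
--     # Após o loop, verifique se o último usuário teve mais de 3 tentativas de falha
--     if tentativas_consecutivas > 3:
--         invasor_detectado = usuario_atual
--
--     # Retorna o resultado final
--     return invasor_detectado if invasor_detectado else "Nenhum invasor detectado"
-- ===== SOURCE B (Python) =====
-- def _grupos(pares):
--     # group consecutive records by user
--     grupos = []
--     i = 0
--     n = len(pares)
--     while i < n:
--         usuario = pares[i][0]
--         j = i
--         while j < n and pares[j][0] == usuario:
--             j += 1
--         grupos.append((usuario, [status for _, status in pares[i:j]]))
--         i = j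
--     return grupos
--
--
-- def _max_sequencia_falhas(statuses):
--     atual = melhor = 0
--     for status in statuses:
--         if status == "falha":
--             atual += 1
--             if atual > melhor:
--                 melhor = atual
--         else:
--             atual = 0
--     return melhor
--
--
-- def detectar_invasao(registros):
--     pares = []
--     for registro in registros:
--         usuario, status = registro.split(":")
--         pares.append((usuario, status))
--
--     invasor_detectado = None
--     for usuario, statuses in _grupos(pares):
--         if _max_sequencia_falhas(statuses) > 3:
--             invasor_detectado = usuario
--
--     return invasor_detectado if invasor_detectado else "Nenhum invasor detectado"
-- ===== Notes on version B (the rewrite author's own statement) =====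
-- stated objective: alternative
-- what changed: B replaces A's single stateful scan (tracking previous user, running streak and late invader fix-ups) by a parse-then-group decomposition: parse all records, group consecutive records by user, compute each group's maximal consecutive-failure run, and let the last group whose maximum exceeds 3 win.
import Mathlib
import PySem

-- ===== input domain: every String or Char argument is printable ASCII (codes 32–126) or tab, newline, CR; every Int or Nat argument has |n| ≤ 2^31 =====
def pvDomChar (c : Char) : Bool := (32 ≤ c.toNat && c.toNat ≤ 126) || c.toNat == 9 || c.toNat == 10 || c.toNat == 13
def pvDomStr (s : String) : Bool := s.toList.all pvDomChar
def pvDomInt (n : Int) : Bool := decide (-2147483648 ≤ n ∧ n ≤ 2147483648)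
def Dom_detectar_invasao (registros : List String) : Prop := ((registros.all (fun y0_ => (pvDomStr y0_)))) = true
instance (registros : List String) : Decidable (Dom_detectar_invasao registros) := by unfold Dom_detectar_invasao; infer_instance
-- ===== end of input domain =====

-- B changes the decomposition (parse, group consecutive records by user, take the last group
-- whose maximal consecutive-failure run exceeds 3); same O(n) cost, no speed claim.

-- ===== PORT A =====
-- one iteration of A's loop over `registros`; state = (usuario_atual, tentativas_consecutivas, invasor_detectado)
def stepA (st : Option String × Int × Option String) (registro : String) :
    Option String × Int × Option String :=
  match PySem.Str.split? registro ":" with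
  | some [usuario, status] =>
      match st with
      | (usuario_atual, tentativas, invasor) =>
        if some usuario == usuario_atual then
          if status == "falha" then
            (usuario_atual, tentativas + 1,
              if tentativas + 1 > 3 then some usuario else invasor)
          else
            (usuario_atual, 0, invasor)
        else
          (some usuario, if status == "falha" then (1 : Int) else 0,
            if tentativas > 3 then usuario_atual else invasor)
  | _ => st  -- `usuario, status = registro.split(":")` raises ValueError here: outside Pre_

def detectar_invasao (registros : List String) : String :=
  let st := registros.foldl stepA (none, 0, none)
  let invasor := if st.2.1 > 3 then st.1 else st.2.2
  match invasor with
  | some u => if u == "" then "Nenhum invasor detectado" else u  -- Python truthiness of the str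
  | none => "Nenhum invasor detectado"

-- ===== PORT B =====
def parseB (registro : String) : String × String :=
  match PySem.Str.split? registro ":" with
  | some [u, s] => (u, s)
  | _ => ("", "")  -- the same unpack raises ValueError in B too: outside Pre_

-- Source B's `_grupos`: the outer while loop = one recursive step per group; the inner
-- `while j < n and pares[j][0] == usuario` scan and the `pares[i:j]` / `pares[i:]` views
-- are takeWhile/dropWhile on the remaining list (exact: same predicate, same split point).
def gruposB : List (String × String) → List (String × List String)
  | [] => []
  | (u, s) :: rest =>
      (u, s :: (rest.takeWhile (fun p => p.1 == u)).map Prod.snd) ::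
        gruposB (rest.dropWhile (fun p => p.1 == u))
  termination_by l => l.length
  decreasing_by simpa using Nat.lt_succ_of_le (List.length_dropWhile_le _ _)

-- Source B's `_max_sequencia_falhas` loop body; state = (atual, melhor)
def stepF (ac : Int × Int) (status : String) : Int × Int :=
  if status == "falha" then
    (ac.1 + 1, if ac.1 + 1 > ac.2 then ac.1 + 1 else ac.2)
  else
    (0, ac.2)

def maxFalhasB (statuses : List String) : Int :=
  (statuses.foldl stepF (0, 0)).2

-- B's loop over the groups
def gstep (inv : Option String) (g : String × List String) : Option String :=
  if maxFalhasB g.2 > 3 then some g.1 else inv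

def detectar_invasao_alt (registros : List String) : String :=
  let pares := registros.map parseB
  let invasor := (gruposB pares).foldl gstep (none : Option String)
  match invasor with
  | some u => if u == "" then "Nenhum invasor detectado" else u
  | none => "Nenhum invasor detectado"

-- ===== PRECONDITION & SPEC =====
-- Pre_ excludes exactly the records on which `registro.split(":")` does not yield two parts:
-- there the tuple unpack raises ValueError in A (and in B alike).
def Pre_detectar_invasao (registros : List String) : Prop :=
  ∀ r ∈ registros, (PySem.Str.split? r ":").map List.length = some 2
instance (registros : List String) : Decidable (Pre_detectar_invasao registros) := by
  unfold Pre_detectar_invasao; infer_instance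

def pvWitness_detectar_invasao : List String :=
  ["admin:falha", "admin:falha", "admin:falha", "admin:falha", "bob:ok"]

def Spec_detectar_invasao (registros : List String) (out : String) : Prop := out = detectar_invasao_alt registros
instance (registros : List String) (out : String) : Decidable (Spec_detectar_invasao registros out) := by unfold Spec_detectar_invasao; infer_instance

-- ===== CLAIM (what is proved, stated in full; the proofs are below) =====
def Claim_equal_detectar_invasao : Prop := ∀ (registros : List String), Dom_detectar_invasao registros → Pre_detectar_invasao registros → Spec_detectar_invasao registros (detectar_invasao registros)

-- ===== LEMMAS AND PROOFS =====

-- A's loop body, once the record is already parsed into (usuario, status)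
def stepA2 (st : Option String × Int × Option String) (p : String × String) :
    Option String × Int × Option String :=
  match st with
  | (usuario_atual, tentativas, invasor) =>
    if some p.1 == usuario_atual then
      if p.2 == "falha" then
        (usuario_atual, tentativas + 1,
          if tentativas + 1 > 3 then some p.1 else invasor)
      else
        (usuario_atual, 0, invasor)
    else
      (some p.1, if p.2 == "falha" then (1 : Int) else 0,
        if tentativas > 3 then usuario_atual else invasor)

lemma foldA_parse (registros : List String) (st : Option String × Int × Option String)
    (h : ∀ r ∈ registros, (PySem.Str.split? r ":").map List.length = some 2) :
    registros.foldl stepA st = (registros.map parseB).foldl stepA2 st := by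
  induction registros generalizing st with
  | nil => rfl
  | cons r rest ih =>
      have hr := h r (by simp)
      have hstep : stepA st r = stepA2 st (parseB r) := by
        unfold stepA parseB stepA2
        match hsp : PySem.Str.split? r ":" with
        | none => rw [hsp] at hr; simp at hr
        | some [] => rw [hsp] at hr; simp at hr
        | some [a] => rw [hsp] at hr; simp at hr
        | some [a, b] => rfl
        | some (a :: b :: c :: t) => rw [hsp] at hr; simp at hr
      simp only [List.map_cons, List.foldl_cons, hstep]
      exact ih _ (fun r hrm => h r (by simp [hrm]))

lemma scan_mono (sts : List String) (a m : Int) (h : a ≤ m) (h0 : 0 ≤ m) :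
    (sts.foldl stepF (a, m)).1 ≤ (sts.foldl stepF (a, m)).2 := by
  induction sts generalizing a m with
  | nil => exact h
  | cons s t ih =>
      simp only [List.foldl_cons, stepF]
      split
      · split
        · exact ih _ _ le_rfl (by omega)
        · exact ih _ _ (by omega) h0
      · exact ih _ _ h0 h0

lemma inner_group (l : List (String × String)) (u : String) (a m : Int) (inv0 : Option String)
    (hl : ∀ p ∈ l, p.1 = u) :
    l.foldl stepA2 (some u, a, if m > 3 then some u else inv0)
      = (some u, ((l.map Prod.snd).foldl stepF (a, m)).1,
          if ((l.map Prod.snd).foldl stepF (a, m)).2 > 3 then some u else inv0) := by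
  induction l generalizing a m with
  | nil => rfl
  | cons p t ih =>
      have hp : p.1 = u := hl p (by simp)
      have ht : ∀ q ∈ t, q.1 = u := fun q hq => hl q (by simp [hq])
      simp only [List.map_cons, List.foldl_cons, stepA2, stepF, hp]
      rw [if_pos (by simp)]
      by_cases hf : (p.2 == "falha") = true
      · simp only [hf, if_true]
        have : (if a + 1 > 3 then some u else if m > 3 then some u else inv0)
            = (if (if a + 1 > m then a + 1 else m) > 3 then some u else inv0) := by
          split_ifs <;> first | rfl | omega
        rw [this]; exact ih _ _ ht
      · simp only [hf, Bool.false_eq_true, if_false]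
        exact ih _ _ ht

lemma head_dropWhile {α : Type} (q : α → Bool) (l : List α) (x : α)
    (h : (l.dropWhile q).head? = some x) : q x = false := by
  induction l with
  | nil => simp [List.dropWhile] at h
  | cons y t ih =>
      rw [List.dropWhile_cons] at h
      by_cases hq : q y = true
      · rw [if_pos hq] at h; exact ih h
      · rw [if_neg hq] at h
        simp at h
        rw [← h]; exact Bool.eq_false_iff.mpr hq

lemma main_groups (l : List (String × String)) (v : Option String) (a : Int)
    (inv : Option String)
    (h1 : a > 3 → inv = v)
    (h2 : ∀ p, l.head? = some p → v ≠ some p.1) :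
    (if (l.foldl stepA2 (v, a, inv)).2.1 > 3
      then (l.foldl stepA2 (v, a, inv)).1
      else (l.foldl stepA2 (v, a, inv)).2.2)
      = (gruposB l).foldl gstep inv := by
  induction l using gruposB.induct generalizing v a inv with
  | case1 =>
      simp only [List.foldl_nil, gruposB]
      by_cases ha : a > 3
      · simp [ha, h1 ha]
      · simp [ha]
  | case2 u s rest ih =>
      have hv : (some u == v) = false := by
        have := h2 (u, s) (by simp)
        simp only [beq_eq_false_iff_ne, ne_eq]
        exact fun he => this he.symm
      have hinv : (if a > 3 then v else inv) = inv := by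
        by_cases ha : a > 3
        · simp [ha, h1 ha]
        · simp [ha]
      have hc0 : ¬ (if (s == "falha") = true then (1 : Int) else 0) > 3 := by
        split <;> omega
      have hstep : stepA2 (v, a, inv) (u, s)
          = (some u, if (s == "falha") = true then (1 : Int) else 0, inv) := by
        simp [stepA2, hv, hinv]
      have hg1 : ∀ p ∈ rest.takeWhile (fun p => p.1 == u), p.1 = u := by
        intro p hp
        have h' := List.mem_takeWhile_imp hp
        simp only [beq_iff_eq] at h'
        exact h'
      have hfold : List.foldl stepA2
            (some u, if (s == "falha") = true then (1 : Int) else 0, inv) rest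
          = List.foldl stepA2
              (some u,
               (((rest.takeWhile (fun p => p.1 == u)).map Prod.snd).foldl stepF
                  (if (s == "falha") = true then (1 : Int) else 0,
                   if (s == "falha") = true then (1 : Int) else 0)).1,
               if (((rest.takeWhile (fun p => p.1 == u)).map Prod.snd).foldl stepF
                  (if (s == "falha") = true then (1 : Int) else 0,
                   if (s == "falha") = true then (1 : Int) else 0)).2 > 3
               then some u else inv)
              (rest.dropWhile (fun p => p.1 == u)) := by
        conv_lhs => rw [← List.takeWhile_append_dropWhile (p := fun p => p.1 == u) (l := rest)]
        rw [List.foldl_append]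
        congr 1
        rw [show ((some u : Option String), (if (s == "falha") = true then (1 : Int) else 0), inv)
              = (some u, (if (s == "falha") = true then (1 : Int) else 0),
                  if (if (s == "falha") = true then (1 : Int) else 0) > 3 then some u else inv) from
            by rw [if_neg hc0]]
        exact inner_group _ u _ _ inv hg1
      have hc0nn : (0 : Int) ≤ (if (s == "falha") = true then (1 : Int) else 0) := by
        split <;> omega
      have hmono := scan_mono ((rest.takeWhile (fun p => p.1 == u)).map Prod.snd)
        (if (s == "falha") = true then (1 : Int) else 0)
        (if (s == "falha") = true then (1 : Int) else 0) le_rfl hc0nn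
      have hIH := ih (some u)
        (((rest.takeWhile (fun p => p.1 == u)).map Prod.snd).foldl stepF
            (if (s == "falha") = true then (1 : Int) else 0,
             if (s == "falha") = true then (1 : Int) else 0)).1
        (if (((rest.takeWhile (fun p => p.1 == u)).map Prod.snd).foldl stepF
            (if (s == "falha") = true then (1 : Int) else 0,
             if (s == "falha") = true then (1 : Int) else 0)).2 > 3 then some u else inv)
        (fun hgt => by rw [if_pos (by omega)])
        (fun p hp => by
          have hqf := head_dropWhile _ _ _ hp
          simp only [beq_eq_false_iff_ne, ne_eq] at hqf
          intro he
          exact hqf (by injection he with he'; exact he'.symm))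
      rw [List.foldl_cons, hstep, hfold, hIH]
      rw [gruposB, List.foldl_cons]
      congr 1
      unfold gstep maxFalhasB
      have hfirst : (s :: (rest.takeWhile (fun p => p.1 == u)).map Prod.snd).foldl stepF (0, 0)
          = ((rest.takeWhile (fun p => p.1 == u)).map Prod.snd).foldl stepF
              (if (s == "falha") = true then (1 : Int) else 0,
               if (s == "falha") = true then (1 : Int) else 0) := by
        rw [List.foldl_cons]
        congr 1
        unfold stepF
        split <;> simp
      rw [hfirst]

-- ===== VERDICT (by name: the statement is the Claim_ definition above) =====
theorem detectar_invasao_spec : Claim_equal_detectar_invasao := by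
  intro registros _ hpre
  unfold Spec_detectar_invasao
  simp only [detectar_invasao, detectar_invasao_alt]
  rw [foldA_parse registros _ hpre]
  rw [main_groups (registros.map parseB) none 0 none (by omega) (by simp)]
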